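-- pv_equiv track=rewrite | github.com/naobservatory/sequence_tools | n2-align.py | score_at
-- ===== SOURCE A (Python) =====
-- def score_at(contig, read, contig_pos):
--     score = 0
--     matched = True
--     for i in range(len(read)):
--         read_val = read[i]
--         contig_val = None
--         if 0 <= contig_pos + i < len(contig):
--             contig_val = contig[contig_pos + i]
--         did_match = matched
--         matched = read_val == contig_val
--         if matched:
--             score += 1
--         if did_match != matched:
--             score -= 1
--
--     return score
-- ===== SOURCE B (Python) =====
-- def score_at(contig, read, contig_pos):
--     n, L = len(contig), len(read)
--
--     def ok(i):
--         j = contig_pos + i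
--         return 0 <= j < n and read[i] == contig[j]
--
--     matches = sum(1 for i in range(L) if ok(i))
--     runs = sum(1 for i in range(L) if not ok(i) and (i == 0 or ok(i - 1)))
--     ends_bad = 1 if L > 0 and not ok(L - 1) else 0
--     return matches - 2 * runs + ends_bad
-- ===== Notes on version B (the rewrite author's own statement) =====
-- stated objective: alternative
-- what changed: Replaces A's sequential state machine (carrying the previous-match flag and per-transition penalty) by a closed-form run formula: count matches, count maximal mismatch-run starts, and return matches - 2*runs + (1 if the read ends mismatched), with no threaded state between positions.
import Mathlib
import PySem

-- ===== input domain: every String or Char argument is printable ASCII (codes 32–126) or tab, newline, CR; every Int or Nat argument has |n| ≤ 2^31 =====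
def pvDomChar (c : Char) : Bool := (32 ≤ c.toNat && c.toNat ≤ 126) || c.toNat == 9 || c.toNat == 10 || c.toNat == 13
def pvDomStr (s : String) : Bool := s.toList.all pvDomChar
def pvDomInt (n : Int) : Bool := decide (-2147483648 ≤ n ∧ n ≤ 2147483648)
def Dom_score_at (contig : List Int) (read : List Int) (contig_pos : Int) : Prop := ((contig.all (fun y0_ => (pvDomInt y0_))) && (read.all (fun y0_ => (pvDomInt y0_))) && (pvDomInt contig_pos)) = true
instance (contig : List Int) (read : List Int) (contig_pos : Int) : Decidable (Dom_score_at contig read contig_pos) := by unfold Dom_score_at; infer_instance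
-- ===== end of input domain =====

-- B replaces A's sequential state machine by a closed-form run formula (matches - 2*mismatch-run-starts + end correction); alternative decomposition, same cost.

-- ===== PORT A =====
-- literal transliteration of A: one loop over range(len(read)) carrying (score, matched).
-- read[i] is exact as (pyGet? read i).getD 0 since i ∈ range(len(read)) is always in range.
def score_at (contig : List Int) (read : List Int) (contig_pos : Int) : Int :=
  ((PySem.List.pyRange 0 (read.length : Int) 1).foldl
    (fun (st : Int × Bool) (i : Int) =>
      let read_val : Int := (PySem.List.pyGet? read i).getD 0
      let contig_val : Option Int :=
        if 0 ≤ contig_pos + i ∧ contig_pos + i < (contig.length : Int) then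
          PySem.List.pyGet? contig (contig_pos + i)
        else none
      let matched : Bool := some read_val == contig_val
      (st.1 + (if matched then 1 else 0) - (if st.2 != matched then 1 else 0), matched))
    (0, true)).1

-- ===== PORT B =====
-- literal transliteration of Source B: helper ok(i), then three independent counts combined
-- arithmetically.  read[i] / contig[j] are exact as (pyGet? …).getD 0: every access Source B
-- makes is in range (i ∈ range(L), and contig[j] only behind the 0 ≤ j < n guard).
def score_at_alt (contig : List Int) (read : List Int) (contig_pos : Int) : Int :=
  let n : Int := contig.length
  let L : Int := read.length
  let ok : Int → Bool := fun i =>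
    let j := contig_pos + i
    decide (0 ≤ j ∧ j < n) && ((PySem.List.pyGet? read i).getD 0 == (PySem.List.pyGet? contig j).getD 0)
  let matchCnt : Int := ((PySem.List.pyRange 0 L 1).filter (fun i => ok i)).length
  let runs : Int := ((PySem.List.pyRange 0 L 1).filter (fun i => !ok i && (i == 0 || ok (i - 1)))).length
  let ends_bad : Int := if 0 < L ∧ ok (L - 1) = false then 1 else 0
  matchCnt - 2 * runs + ends_bad

-- ===== PRECONDITION & SPEC =====
def Spec_score_at (contig : List Int) (read : List Int) (contig_pos : Int) (out : Int) : Prop := out = score_at_alt contig read contig_pos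
instance (contig : List Int) (read : List Int) (contig_pos : Int) (out : Int) : Decidable (Spec_score_at contig read contig_pos out) := by unfold Spec_score_at; infer_instance

-- ===== CLAIM (what is proved, stated in full; the proofs are below) =====
def Claim_equal_score_at : Prop := ∀ (contig : List Int) (read : List Int) (contig_pos : Int), Dom_score_at contig read contig_pos → Spec_score_at contig read contig_pos (score_at contig read contig_pos)

-- ===== LEMMAS AND PROOFS =====

-- A's per-position match test, as a function of the index
def pvFA (contig : List Int) (read : List Int) (contig_pos : Int) : Int → Bool := fun i =>
  some ((PySem.List.pyGet? read i).getD 0) ==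
    (if 0 ≤ contig_pos + i ∧ contig_pos + i < (contig.length : Int) then
      PySem.List.pyGet? contig (contig_pos + i)
    else none)

-- B's ok(i)
def pvOK (contig : List Int) (read : List Int) (contig_pos : Int) : Int → Bool := fun i =>
  decide (0 ≤ contig_pos + i ∧ contig_pos + i < (contig.length : Int)) &&
    ((PySem.List.pyGet? read i).getD 0 == (PySem.List.pyGet? contig (contig_pos + i)).getD 0)

theorem pv_fa_eq_ok (contig : List Int) (read : List Int) (contig_pos : Int) :
    pvFA contig read contig_pos = pvOK contig read contig_pos := by
  funext i
  unfold pvFA pvOK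
  by_cases h : 0 ≤ contig_pos + i ∧ contig_pos + i < (contig.length : Int)
  · rw [if_pos h, PySem.List.pyGet?_eq_some_getElem contig h.1 h.2]
    simp [h]
  · rw [if_neg h]
    simp [h]

-- number of adjacent flips in the sequence b :: m (A's transition penalty)
def pvTrans : Bool → List Bool → Int
  | _, [] => 0
  | b, x :: r => (if b != x then 1 else 0) + pvTrans x r

-- number of False-run starts in b :: m (not counting b itself)
def pvFS : Bool → List Bool → Int
  | _, [] => 0
  | b, x :: r => (if !x && b then 1 else 0) + pvFS x r

-- last value of the sequence b :: m
def pvLast : Bool → List Bool → Bool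
  | b, [] => b
  | _, x :: r => pvLast x r

-- A's fused loop over any index list = matches minus transitions of the mapped booleans
theorem pv_fused_eq (f : Int → Bool) (L : List Int) (s : Int) (b : Bool) :
    ((L.foldl
      (fun (st : Int × Bool) (i : Int) =>
        (st.1 + (if f i then 1 else 0) - (if st.2 != f i then 1 else 0), f i))
      (s, b)).1 : Int)
    = s + (((L.map f).filter id).length : Int) - pvTrans b (L.map f) := by
  induction L generalizing s b with
  | nil => simp [pvTrans]
  | cons i L ih =>
    simp only [List.foldl_cons, List.map_cons, List.filter_cons, pvTrans]
    rw [ih]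
    cases hb : b <;> cases hx : f i <;> simp [hx] <;> omega

-- transitions expressed through run starts and the final value
theorem pv_trans_eq (m : List Bool) (b : Bool) :
    pvTrans b m = 2 * pvFS b m + (if b then 0 else 1) - (if pvLast b m then 0 else 1) := by
  induction m generalizing b with
  | nil => cases b <;> simp [pvTrans, pvFS, pvLast]
  | cons x r ih =>
    simp only [pvTrans, pvFS, pvLast]
    rw [ih]
    cases b <;> cases x <;> simp <;> (try split_ifs) <;> omega

theorem pv_fs_append (m : List Bool) (y : Bool) (b : Bool) :
    pvFS b (m ++ [y]) = pvFS b m + (if !y && pvLast b m then 1 else 0) := by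
  induction m generalizing b with
  | nil => simp [pvFS, pvLast]
  | cons x r ih => simp only [List.cons_append, pvFS, pvLast]; rw [ih]; ring

theorem pv_last_append (m : List Bool) (y : Bool) (b : Bool) :
    pvLast b (m ++ [y]) = y := by
  induction m generalizing b with
  | nil => rfl
  | cons x r ih => simpa [pvLast] using ih x

-- the last match value over range(k)
theorem pv_last_range (f : Int → Bool) (k : Nat) :
    pvLast true ((PySem.List.pyRange 0 (k : Int) 1).map f)
      = (if k = 0 then true else f ((k : Int) - 1)) := by
  cases k with
  | zero => simp [PySem.List.pyRange_one_eq_nil, pvLast]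
  | succ k =>
    rw [show ((k + 1 : Nat) : Int) = (k : Int) + 1 by push_cast; ring,
        PySem.List.pyRange_one_succ_right (by positivity)]
    simp [pv_last_append]

-- B's run count over range(k) = pvFS of the mapped booleans
theorem pv_runs_eq (f : Int → Bool) (k : Nat) :
    ((((PySem.List.pyRange 0 (k : Int) 1).filter
        (fun i => !f i && (i == 0 || f (i - 1)))).length : Int))
      = pvFS true ((PySem.List.pyRange 0 (k : Int) 1).map f) := by
  induction k with
  | zero => simp [PySem.List.pyRange_one_eq_nil, pvFS]
  | succ k ih =>
    rw [show ((k + 1 : Nat) : Int) = (k : Int) + 1 by push_cast; ring,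
        PySem.List.pyRange_one_succ_right (by positivity)]
    simp only [List.filter_append, List.map_append, List.length_append, List.map]
    rw [pv_fs_append, pv_last_range]
    push_cast
    rw [ih]
    cases k with
    | zero =>
      cases h : f 0 <;>
        simp [List.filter, h, PySem.List.pyRange_one_eq_nil, pvFS]
    | succ j =>
      have hne : (((j + 1 : Nat) : Int) == 0) = false := by
        simp only [beq_eq_false_iff_ne]; push_cast; omega
      simp only [List.filter, hne, Bool.false_or, if_neg (show ¬ (j + 1 : Nat) = 0 by omega)]
      cases h1 : f ((j + 1 : Nat) : Int) <;> cases h2 : f (((j + 1 : Nat) : Int) - 1) <;>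
        simp [h1, h2]

-- combine everything for an arbitrary match function over range(k)
theorem pv_main (f : Int → Bool) (k : Nat) :
    (((PySem.List.pyRange 0 (k : Int) 1).foldl
      (fun (st : Int × Bool) (i : Int) =>
        (st.1 + (if f i then 1 else 0) - (if st.2 != f i then 1 else 0), f i))
      (0, true)).1 : Int)
    = (((PySem.List.pyRange 0 (k : Int) 1).filter (fun i => f i)).length : Int)
      - 2 * (((PySem.List.pyRange 0 (k : Int) 1).filter
          (fun i => !f i && (i == 0 || f (i - 1)))).length : Int)
      + (if 0 < (k : Int) ∧ f ((k : Int) - 1) = false then 1 else 0) := by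
  rw [pv_fused_eq, pv_trans_eq, ← pv_runs_eq]
  have hone : ((((PySem.List.pyRange 0 (k : Int) 1).map f).filter id).length : Int)
      = (((PySem.List.pyRange 0 (k : Int) 1).filter (fun i => f i)).length : Int) := by
    rw [List.filter_map]; simp
  rw [hone, pv_last_range]
  cases k with
  | zero => simp
  | succ j =>
    have hpos : (0 : Int) < ((j + 1 : Nat) : Int) := by positivity
    have hne : ¬ (j + 1 = 0) := by omega
    cases h : f (((j + 1 : Nat) : Int) - 1) <;> simp [h, hpos, hne] <;> omega

theorem score_at_eq (contig : List Int) (read : List Int) (contig_pos : Int) :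
    score_at contig read contig_pos = score_at_alt contig read contig_pos := by
  have hA : score_at contig read contig_pos
      = ((PySem.List.pyRange 0 (read.length : Int) 1).foldl
          (fun (st : Int × Bool) (i : Int) =>
            (st.1 + (if pvFA contig read contig_pos i then 1 else 0)
              - (if st.2 != pvFA contig read contig_pos i then 1 else 0),
             pvFA contig read contig_pos i))
          (0, true)).1 := rfl
  have hB : score_at_alt contig read contig_pos
      = (((PySem.List.pyRange 0 (read.length : Int) 1).filter
            (fun i => pvOK contig read contig_pos i)).length : Int)
        - 2 * (((PySem.List.pyRange 0 (read.length : Int) 1).filter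
            (fun i => !pvOK contig read contig_pos i
              && (i == 0 || pvOK contig read contig_pos (i - 1)))).length : Int)
        + (if 0 < (read.length : Int)
              ∧ pvOK contig read contig_pos ((read.length : Int) - 1) = false then 1 else 0) := rfl
  rw [hA, hB, pv_fa_eq_ok, pv_main (pvOK contig read contig_pos) read.length]

-- ===== VERDICT (by name: the statement is the Claim_ definition above) =====
theorem score_at_spec : Claim_equal_score_at := by
  intro contig read contig_pos _
  exact score_at_eq contig read contig_pos
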